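-- pv_equiv track=rewrite | github.com/gsittyz/self_study | inshi/inshi_2015_2.py | hnkh
-- ===== SOURCE A (Python) =====
-- def g(n):
--     res = 1
--     for _ in range(n):
--         res = (1103515245 * res + 12345) % (2**26)
--     return res
--
-- def hnkh(n):
--     gn = g(n)
--     hn = gn % (2**10)
--     k = 1
--     gnk = (1103515245 * gn + 12345) % (2**26)
--     hnk = gnk % (2**10)
--     while hn != hnk:
--         k += 1
--         gnk = (1103515245 * gnk + 12345) % (2**26)
--         hnk = gnk % (2**10)
--     return k
-- ===== SOURCE B (Python) =====
-- def hnkh(n):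
--     # The low 10 bits of the LCG x -> (1103515245*x + 12345) % 2**26 evolve as the
--     # self-contained LCG h -> (1103515245*h + 12345) % 2**10, which has full period
--     # (Hull-Dobell: 12345 is odd, 1103515245 % 4 == 1), so any value first recurs
--     # after exactly 2**10 steps, independently of n.
--     return 2 ** 10
-- ===== Notes on version B (the rewrite author's own statement) =====
-- stated objective: faster
-- what changed: B replaces iterating the LCG n times and then searching for the recurrence of its low 10 bits by the closed form: the low 10 bits form a full-period LCG mod 2^10 (Hull-Dobell), so the first recurrence is always after exactly 1024 steps, independent of n.
import Mathlib
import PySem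

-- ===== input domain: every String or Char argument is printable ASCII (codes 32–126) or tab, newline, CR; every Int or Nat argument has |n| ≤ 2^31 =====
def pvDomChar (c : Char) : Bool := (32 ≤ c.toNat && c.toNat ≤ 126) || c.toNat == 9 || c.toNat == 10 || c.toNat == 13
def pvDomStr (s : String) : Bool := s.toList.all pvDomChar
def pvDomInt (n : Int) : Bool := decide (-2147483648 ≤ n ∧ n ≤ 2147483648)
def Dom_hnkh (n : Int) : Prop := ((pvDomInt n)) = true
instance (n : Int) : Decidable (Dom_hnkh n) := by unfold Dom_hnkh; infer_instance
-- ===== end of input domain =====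

-- B replaces A's O(n) LCG iteration plus linear recurrence search by the closed form 1024
-- (the low 10 bits form a full-period LCG mod 2^10); equivalence is proved for every Int n.

-- ===== PORT A =====
-- one LCG step modulo 2^26, as in both A's g and its while loop
def pvStep26 (x : Int) : Int := PySem.Int.mod (1103515245 * x + 12345) (2 ^ 26)

-- A's `while hn != hnk` loop; fuel 2048 is a totality device only (the loop leaves after ≤ 1024 tests)
def pvLoopA : Nat → Int → Int → Int → Int → Int
  | 0, _, _, _, k => k
  | fuel + 1, hn, gnk, hnk, k =>
    if hn ≠ hnk then
      let gnk' := pvStep26 gnk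
      let hnk' := PySem.Int.mod gnk' (2 ^ 10)
      pvLoopA fuel hn gnk' hnk' (k + 1)
    else k

def hnkh (n : Int) : Int :=
  let gn := (PySem.List.pyRange 0 n 1).foldl (fun res _ => pvStep26 res) 1
  let hn := PySem.Int.mod gn (2 ^ 10)
  let gnk := pvStep26 gn
  let hnk := PySem.Int.mod gnk (2 ^ 10)
  pvLoopA 2048 hn gnk hnk 1

-- ===== PORT B =====
def hnkh_alt (n : Int) : Int := 2 ^ 10

-- ===== PRECONDITION & SPEC =====
def Spec_hnkh (n : Int) (out : Int) : Prop := out = hnkh_alt n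
instance (n : Int) (out : Int) : Decidable (Spec_hnkh n out) := by unfold Spec_hnkh; infer_instance

-- ===== CLAIM (what is proved, stated in full; the proofs are below) =====
def Claim_equal_hnkh : Prop := ∀ (n : Int), Dom_hnkh n → Spec_hnkh n (hnkh n)

-- ===== LEMMAS AND PROOFS =====

-- the LCG induced on the low 10 bits, on Int (as the loop sees it) and on Nat
def pvFLow (h : Int) : Int := PySem.Int.mod (1103515245 * h + 12345) 1024

def pvF (h : Nat) : Nat := (1103515245 * h + 12345) % 1024

-- pvFp m h = pvF iterated m times on h
def pvFp : Nat → Nat → Nat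
  | 0, h => h
  | m + 1, h => pvFp m (pvF h)

-- A's loop with the 26-bit state projected to its low 10 bits
def pvLoopH : Nat → Int → Int → Int → Int
  | 0, _, _, k => k
  | fuel + 1, hn, h, k => if hn ≠ h then pvLoopH fuel hn (pvFLow h) (k + 1) else k

-- single pass along the orbit of 0: the next 1023 states differ from 0, the 1024th equals 0
def pvWalk (hn : Nat) : Nat → Nat → Bool
  | 0, h => h == hn
  | m + 1, h => (h != hn) && pvWalk hn m (pvF h)

set_option maxRecDepth 20000 in
theorem pvZeroWalk : pvWalk 0 1023 (pvF 0) = true := by decide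

theorem pvWalk_spec (hn : Nat) : ∀ (m h : Nat), pvWalk hn m h = true →
    (∀ j, j < m → pvFp j h ≠ hn) ∧ pvFp m h = hn := by
  intro m
  induction m with
  | zero =>
    intro h hw
    exact ⟨fun j hj => absurd hj (by omega), by simpa [pvWalk, pvFp] using hw⟩
  | succ m ih =>
    intro h hw
    rw [show pvWalk hn (m + 1) h = ((h != hn) && pvWalk hn m (pvF h)) from rfl,
      Bool.and_eq_true, bne_iff_ne] at hw
    obtain ⟨hne, hw⟩ := hw
    obtain ⟨h1, h2⟩ := ih (pvF h) hw
    refine ⟨?_, h2⟩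
    intro j hj
    match j with
    | 0 => simpa [pvFp] using hne
    | j + 1 => exact h1 j (by omega)

set_option maxRecDepth 100000 in
theorem pvFirst : (∀ k, 1 ≤ k → k < 1024 → pvFp k 0 ≠ 0) ∧ pvFp 1024 0 = 0 := by
  obtain ⟨h1, h2⟩ := pvWalk_spec 0 1023 (pvF 0) pvZeroWalk
  constructor
  · intro k hk1 hk2
    match k with
    | j + 1 => exact h1 j (by omega)
  · exact h2

theorem pvFp_add : ∀ (m n h : Nat), pvFp (m + n) h = pvFp n (pvFp m h) := by
  intro m
  induction m with
  | zero => intro n h; rw [Nat.zero_add]; rfl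
  | succ m ih =>
    intro n h
    rw [show m + 1 + n = (m + n) + 1 by omega]
    show pvFp (m + n) (pvF h) = pvFp n (pvFp m (pvF h))
    exact ih n (pvF h)

theorem pvF_lt (h : Nat) : pvF h < 1024 := Nat.mod_lt _ (by norm_num)

theorem pvFp_lt : ∀ (m h : Nat), h < 1024 → pvFp m h < 1024
  | 0, _, hh => hh
  | m + 1, h, _ => pvFp_lt m (pvF h) (pvF_lt h)

-- 869 is the inverse of 1103515245 modulo 1024 and 967 ≡ -12345, so pvF is injective on [0,1024)
set_option maxRecDepth 40000 in
theorem pvF_inj (x y : Nat) (hx : x < 1024) (hy : y < 1024) (h : pvF x = pvF y) : x = y := by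
  have ex : (869 * (pvF x + 967)) % 1024 = x := by unfold pvF; omega
  have ey : (869 * (pvF y + 967)) % 1024 = y := by unfold pvF; omega
  rw [← ex, ← ey, h]

theorem pvFp_cancel : ∀ (m x y : Nat), x < 1024 → y < 1024 → pvFp m x = pvFp m y → x = y
  | 0, _, _, _, _, h => h
  | m + 1, x, y, hx, hy, h =>
    pvF_inj x y hx hy (pvFp_cancel m (pvF x) (pvF y) (pvF_lt x) (pvF_lt y) h)

set_option maxRecDepth 100000 in
theorem pvFp_zero_ne (i d : Nat) (hd1 : 1 ≤ d) (hd2 : d < 1024) :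
    pvFp (i + d) 0 ≠ pvFp i 0 := by
  intro h
  have hc : pvFp i (pvFp d 0) = pvFp i 0 := by
    rw [← pvFp_add d i 0, Nat.add_comm d i]; exact h
  have := pvFp_cancel i (pvFp d 0) 0 (pvFp_lt d 0 (by norm_num)) (by norm_num) hc
  exact pvFirst.1 d hd1 hd2 this

-- every residue < 1024 lies on the orbit of 0 (pigeonhole from injectivity of the orbit map)
theorem pvCover (h : Nat) (hh : h < 1024) : ∃ i, i < 1024 ∧ pvFp i 0 = h := by
  have hinj : Set.InjOn (fun i => pvFp i 0) (Finset.range 1024) := by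
    intro a ha b hb hab
    simp only [Finset.coe_range, Set.mem_Iio] at ha hb
    by_contra hne
    rcases lt_or_gt_of_ne hne with hlt | hlt
    · exact pvFp_zero_ne a (b - a) (by omega) (by omega)
        (by rw [show a + (b - a) = b by omega]; exact hab.symm)
    · exact pvFp_zero_ne b (a - b) (by omega) (by omega)
        (by rw [show b + (a - b) = a by omega]; exact hab)
  have hsub : (Finset.range 1024).image (fun i => pvFp i 0) ⊆ Finset.range 1024 := by
    intro x hx
    simp only [Finset.mem_image, Finset.mem_range] at hx ⊢
    obtain ⟨i, _, rfl⟩ := hx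
    exact pvFp_lt i 0 (by norm_num)
  have hcard : ((Finset.range 1024).image (fun i => pvFp i 0)).card = 1024 := by
    rw [Finset.card_image_of_injOn hinj, Finset.card_range]
  have heq : (Finset.range 1024).image (fun i => pvFp i 0) = Finset.range 1024 :=
    Finset.eq_of_subset_of_card_le hsub (by rw [hcard, Finset.card_range])
  have hmem : h ∈ (Finset.range 1024).image (fun i => pvFp i 0) := by
    rw [heq]; exact Finset.mem_range.mpr hh
  simp only [Finset.mem_image, Finset.mem_range] at hmem
  obtain ⟨i, hi, hie⟩ := hmem
  exact ⟨i, hi, hie⟩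

theorem pvPeriodic (h : Nat) (hh : h < 1024) : pvFp 1024 h = h := by
  obtain ⟨i, _, rfl⟩ := pvCover h hh
  calc pvFp 1024 (pvFp i 0) = pvFp (i + 1024) 0 := (pvFp_add i 1024 0).symm
    _ = pvFp (1024 + i) 0 := by rw [Nat.add_comm]
    _ = pvFp i (pvFp 1024 0) := pvFp_add 1024 i 0
    _ = pvFp i 0 := by rw [pvFirst.2]

theorem pvNoEarly (h k : Nat) (hh : h < 1024) (hk1 : 1 ≤ k) (hk2 : k < 1024) :
    pvFp k h ≠ h := by
  obtain ⟨i, _, rfl⟩ := pvCover h hh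
  intro hc
  have : pvFp (i + k) 0 = pvFp i 0 := by rw [pvFp_add i k 0, hc]
  exact pvFp_zero_ne i k hk1 hk2 this

theorem pvFLow_natCast (h : Nat) : pvFLow (h : Int) = ((pvF h : Nat) : Int) := by
  unfold pvFLow pvF
  have h1 : (1103515245 * (h : Int) + 12345) = ((1103515245 * h + 12345 : Nat) : Int) := by
    push_cast; ring
  have h2 : (1024 : Int) = ((1024 : Nat) : Int) := by norm_num
  rw [h1, h2, PySem.Int.mod_natCast]

theorem pvLoopAux : ∀ (d fuel t h : Nat) (k : Int),
    h < 1024 → d < fuel → t + d = 1024 → 1 ≤ t → k = (t : Int) →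
    pvLoopH fuel (h : Int) ((pvFp t h : Nat) : Int) k = 1024 := by
  intro d
  induction d with
  | zero =>
    intro fuel t h k hh hf ht ht1 hk
    obtain ⟨f', rfl⟩ : ∃ f', fuel = f' + 1 := ⟨fuel - 1, by omega⟩
    have ht' : t = 1024 := by omega
    subst ht'; subst hk
    rw [pvPeriodic h hh]
    show (if (h : Int) ≠ (h : Int) then _ else ((1024 : Nat) : Int)) = 1024
    simp
  | succ d ih =>
    intro fuel t h k hh hf ht ht1 hk
    obtain ⟨f', rfl⟩ : ∃ f', fuel = f' + 1 := ⟨fuel - 1, by omega⟩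
    have hne : (h : Int) ≠ ((pvFp t h : Nat) : Int) := by
      intro hc
      exact pvNoEarly h t hh ht1 (by omega) (by exact_mod_cast hc.symm)
    rw [show pvLoopH (f' + 1) (h : Int) ((pvFp t h : Nat) : Int) k
        = if (h : Int) ≠ ((pvFp t h : Nat) : Int) then
            pvLoopH f' (h : Int) (pvFLow ((pvFp t h : Nat) : Int)) (k + 1)
          else k from rfl,
      if_pos hne, pvFLow_natCast,
      show pvF (pvFp t h) = pvFp (t + 1) h from (pvFp_add t 1 h).symm]
    exact ih f' (t + 1) h (k + 1) hh (by omega) (by omega) (by omega)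
      (by rw [hk]; push_cast; ring)

theorem pvLoopH_returns (x : Int) (h0 : 0 ≤ x) (h1 : x < 1024) :
    pvLoopH 2048 x (pvFLow x) 1 = 1024 := by
  obtain ⟨m, rfl⟩ : ∃ m : Nat, x = (m : Int) := ⟨x.toNat, (Int.toNat_of_nonneg h0).symm⟩
  have hm : m < 1024 := by exact_mod_cast h1
  rw [pvFLow_natCast, show pvF m = pvFp 1 m from rfl]
  exact pvLoopAux 1023 2048 1 m 1 hm (by norm_num) (by norm_num) (by norm_num) (by norm_num)

theorem pvProj (x : Int) :
    PySem.Int.mod (pvStep26 x) (2 ^ 10) = pvFLow (PySem.Int.mod x (2 ^ 10)) := by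
  unfold pvStep26 pvFLow
  rw [PySem.Int.mod_eq_emod_of_pos (show (0:Int) < 2 ^ 26 by norm_num),
    PySem.Int.mod_eq_emod_of_pos (show (0:Int) < 2 ^ 10 by norm_num),
    PySem.Int.mod_eq_emod_of_pos (show (0:Int) < 2 ^ 10 by norm_num),
    PySem.Int.mod_eq_emod_of_pos (show (0:Int) < 1024 by norm_num)]
  have e26 : (2:Int) ^ 26 = 67108864 := by norm_num
  have e10 : (2:Int) ^ 10 = 1024 := by norm_num
  rw [e26, e10]
  omega

theorem pvSim (fuel : Nat) (hn : Int) :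
    ∀ (gnk k : Int),
      pvLoopA fuel hn gnk (PySem.Int.mod gnk (2 ^ 10)) k
        = pvLoopH fuel hn (PySem.Int.mod gnk (2 ^ 10)) k := by
  induction fuel with
  | zero => intro gnk k; rfl
  | succ fuel ih =>
    intro gnk k
    show (if hn ≠ PySem.Int.mod gnk (2 ^ 10) then
        pvLoopA fuel hn (pvStep26 gnk) (PySem.Int.mod (pvStep26 gnk) (2 ^ 10)) (k + 1)
      else k) = _
    rw [show pvLoopH (fuel + 1) hn (PySem.Int.mod gnk (2 ^ 10)) k
        = if hn ≠ PySem.Int.mod gnk (2 ^ 10) then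
            pvLoopH fuel hn (pvFLow (PySem.Int.mod gnk (2 ^ 10))) (k + 1)
          else k from rfl]
    split
    · rw [ih (pvStep26 gnk) (k + 1), pvProj]
    · rfl

theorem hnkh_eq (n : Int) : hnkh n = 1024 := by
  show pvLoopA 2048 _ _ _ 1 = 1024
  rw [pvSim, pvProj]
  exact pvLoopH_returns _
    (PySem.Int.mod_nonneg _ (by norm_num))
    (by
      have := PySem.Int.mod_lt ((PySem.List.pyRange 0 n 1).foldl (fun res _ => pvStep26 res) 1)
        (show (0:Int) < 2 ^ 10 by norm_num)
      omega)

-- ===== VERDICT (by name: the statement is the Claim_ definition above) =====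
theorem hnkh_spec : Claim_equal_hnkh := by
  intro n _hDom
  unfold Spec_hnkh hnkh_alt
  exact hnkh_eq n
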